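-- pv_equiv track=rewrite | github.com/aldsouza4/Dynamic_Programming | sliding_Window.py | maxSizesum
-- ===== SOURCE A (Python) =====
-- def maxSizesum(arr, k):
--     i = 0
--     j = 0
--
--     mx = 0
--
--     while j < len(arr):
--         temp = sum(arr[i:j])
--
--         if temp == k:
--             mx = max(mx, len(arr[i:j]))
--
--         elif temp > k:
--             while temp > k:
--                 temp -= arr[i]
--                 i += 1
--
--         j += 1
--
--     return mx
-- ===== SOURCE B (Python) =====
-- def maxSizesum(arr, k):
--     # One pass with an incrementally maintained running window sum
--     # (A re-sums the slice arr[i:j] at every step).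
--     mx = 0
--     i = 0
--     s = 0  # s == sum(arr[i:j]) at the head of each iteration
--     for j, x in enumerate(arr):
--         if s == k:
--             mx = max(mx, j - i)
--         elif s > k:
--             while s > k:
--                 s -= arr[i]
--                 i += 1
--         s += x
--     return mx
-- ===== Notes on version B (the rewrite author's own statement) =====
-- stated objective: faster
-- what changed: B maintains the window sum incrementally in a single pass (add the entering element, subtract leaving elements), instead of re-summing the slice arr[i:j] from scratch at every outer iteration as A does.
import Mathlib
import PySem

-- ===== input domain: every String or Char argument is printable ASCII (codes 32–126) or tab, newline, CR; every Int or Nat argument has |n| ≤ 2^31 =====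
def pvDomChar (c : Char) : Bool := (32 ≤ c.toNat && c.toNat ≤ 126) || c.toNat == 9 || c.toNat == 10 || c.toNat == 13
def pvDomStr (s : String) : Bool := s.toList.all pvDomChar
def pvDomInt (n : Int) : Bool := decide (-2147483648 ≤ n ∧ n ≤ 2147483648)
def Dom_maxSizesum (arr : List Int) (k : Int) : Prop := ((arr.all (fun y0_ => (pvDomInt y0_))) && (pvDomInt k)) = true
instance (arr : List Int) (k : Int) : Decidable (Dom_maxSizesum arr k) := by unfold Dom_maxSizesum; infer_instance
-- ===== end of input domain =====

-- B replaces A's per-iteration re-summation of the slice arr[i:j] by an incrementally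
-- maintained running window sum (one pass over the list).

-- ===== PORT A =====
-- A's inner loop `while temp > k: temp -= arr[i]; i += 1`; `none` is Python's
-- IndexError (those inputs are excluded by Pre_), where it stops with the current state
def pvShrinkA (arr : List Int) (k : Int) (temp : Int) (i : Nat) : Int × Nat :=
  if temp > k then
    match h : PySem.List.pyGet? arr (i : Int) with
    | some v => pvShrinkA arr k (temp - v) (i + 1)
    | none => (temp, i)
  else (temp, i)
termination_by arr.length - i
decreasing_by
  simp only [PySem.List.pyGet?_natCast] at h
  obtain ⟨hlt, -⟩ := List.getElem?_eq_some_iff.mp h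
  omega

-- A's outer loop `while j < len(arr)`, state (i, j, mx); `temp = sum(arr[i:j])`
def pvLoopA (arr : List Int) (k : Int) (i j : Nat) (mx : Int) : Int :=
  if hj : j < arr.length then
    let temp := (PySem.List.slice arr (some (i : Int)) (some (j : Int))).sum
    if temp = k then
      pvLoopA arr k i (j + 1)
        (max mx ((PySem.List.slice arr (some (i : Int)) (some (j : Int))).length : Int))
    else if temp > k then
      pvLoopA arr k (pvShrinkA arr k temp i).2 (j + 1) mx
    else
      pvLoopA arr k i (j + 1) mx
  else mx
termination_by arr.length - j

def maxSizesum (arr : List Int) (k : Int) : Int := pvLoopA arr k 0 0 0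

-- ===== PORT B =====
-- B's inner loop `while s > k: s -= arr[i]; i += 1` (same as A's inner loop)
def pvShrinkB (arr : List Int) (k : Int) (s : Int) (i : Nat) : Int × Nat :=
  if s > k then
    match h : PySem.List.pyGet? arr (i : Int) with
    | some v => pvShrinkB arr k (s - v) (i + 1)
    | none => (s, i)
  else (s, i)
termination_by arr.length - i
decreasing_by
  simp only [PySem.List.pyGet?_natCast] at h
  obtain ⟨hlt, -⟩ := List.getElem?_eq_some_iff.mp h
  omega

-- B's `for j, x in enumerate(arr)` loop: structural recursion on the remaining
-- list, state (j, i, s, mx) with s the running window sum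
def pvLoopB (arr : List Int) (k : Int) : List Int → Nat → Nat → Int → Int → Int
  | [], _j, _i, _s, mx => mx
  | x :: rest, j, i, s, mx =>
    if s = k then
      pvLoopB arr k rest (j + 1) i (s + x) (max mx ((j : Int) - (i : Int)))
    else if s > k then
      let p := pvShrinkB arr k s i
      pvLoopB arr k rest (j + 1) p.2 (p.1 + x) mx
    else
      pvLoopB arr k rest (j + 1) i (s + x) mx

def maxSizesum_alt (arr : List Int) (k : Int) : Int := pvLoopB arr k arr 0 0 0 0

-- ===== PRECONDITION & SPEC =====
-- Pre_ excludes exactly the inputs on which A raises IndexError: when k < 0 and some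
-- element of arr is < -k, A's inner shrink loop runs the index past the end of the list.
def Pre_maxSizesum (arr : List Int) (k : Int) : Prop := 0 ≤ k ∨ ∀ x ∈ arr, -k ≤ x
instance (arr : List Int) (k : Int) : Decidable (Pre_maxSizesum arr k) := by
  unfold Pre_maxSizesum; infer_instance

def pvWitness_maxSizesum : List Int × Int := ([1, 2, 1, 3], 3)

def Spec_maxSizesum (arr : List Int) (k : Int) (out : Int) : Prop := out = maxSizesum_alt arr k
instance (arr : List Int) (k : Int) (out : Int) : Decidable (Spec_maxSizesum arr k out) := by
  unfold Spec_maxSizesum; infer_instance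

-- ===== CLAIM (what is proved, stated in full; the proofs are below) =====
def Claim_equal_maxSizesum : Prop := ∀ (arr : List Int) (k : Int), Dom_maxSizesum arr k → Pre_maxSizesum arr k → Spec_maxSizesum arr k (maxSizesum arr k)

-- ===== LEMMAS AND PROOFS =====

-- unfolding lemmas for the two (identical-bodied) shrink loops
lemma pvShrinkA_step_some (arr : List Int) (k temp : Int) (i : Nat) (v : Int)
    (hgt : temp > k) (h : PySem.List.pyGet? arr (i : Int) = some v) :
    pvShrinkA arr k temp i = pvShrinkA arr k (temp - v) (i + 1) := by
  conv_lhs => rw [pvShrinkA.eq_def]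
  simp only [if_pos hgt]
  split
  · rename_i v' heq
    rw [h] at heq
    injection heq with hv
    rw [hv]
  · rename_i heq
    rw [h] at heq
    exact absurd heq (by simp)

lemma pvShrinkA_done (arr : List Int) (k temp : Int) (i : Nat) (hle : ¬ temp > k) :
    pvShrinkA arr k temp i = (temp, i) := by
  rw [pvShrinkA.eq_def]
  simp [hle]

lemma pvShrinkB_step_some (arr : List Int) (k s : Int) (i : Nat) (v : Int)
    (hgt : s > k) (h : PySem.List.pyGet? arr (i : Int) = some v) :
    pvShrinkB arr k s i = pvShrinkB arr k (s - v) (i + 1) := by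
  conv_lhs => rw [pvShrinkB.eq_def]
  simp only [if_pos hgt]
  split
  · rename_i v' heq
    rw [h] at heq
    injection heq with hv
    rw [hv]
  · rename_i heq
    rw [h] at heq
    exact absurd heq (by simp)

lemma pvShrinkB_done (arr : List Int) (k s : Int) (i : Nat) (hle : ¬ s > k) :
    pvShrinkB arr k s i = (s, i) := by
  rw [pvShrinkB.eq_def]
  simp [hle]

lemma pvShrink_eq (arr : List Int) (k : Int) :
    ∀ temp i, pvShrinkA arr k temp i = pvShrinkB arr k temp i := by
  intro temp i
  fun_induction pvShrinkA arr k temp i with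
  | case1 temp i hgt v h ih =>
      rw [pvShrinkB_step_some arr k temp i v hgt h]
      exact ih
  | case2 temp i hgt h =>
      rw [pvShrinkB.eq_def]
      simp only [if_pos hgt]
      split
      · rename_i v' heq
        rw [h] at heq
        exact absurd heq (by simp)
      · rfl
  | case3 temp i hgt =>
      rw [pvShrinkB_done arr k temp i hgt]

-- sum of the window arr[i:j]
def pvS (arr : List Int) (i j : Nat) : Int := ((arr.drop i).take (j - i)).sum

lemma pvS_empty (arr : List Int) (i j : Nat) (h : j ≤ i) : pvS arr i j = 0 := by
  simp [pvS, Nat.sub_eq_zero_of_le h]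

lemma pvS_cons_left (arr : List Int) (i j : Nat) (hij : i < j) (hi : i < arr.length) :
    pvS arr i j = arr[i] + pvS arr (i + 1) j := by
  unfold pvS
  rw [List.drop_eq_getElem_cons hi]
  have h1 : j - i = (j - (i + 1)) + 1 := by omega
  rw [h1, List.take_succ_cons, List.sum_cons]

lemma pvS_succ_right (arr : List Int) (i j : Nat) (hij : i ≤ j) (hj : j < arr.length) :
    pvS arr i (j + 1) = pvS arr i j + arr[j] := by
  unfold pvS
  have h1 : j + 1 - i = (j - i) + 1 := by omega
  rw [h1, List.take_add_one, List.sum_append]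
  have h2 : j - i < (arr.drop i).length := by
    simp only [List.length_drop]; omega
  rw [List.getElem?_eq_getElem h2]
  simp only [Option.toList_some, List.sum_cons, List.sum_nil, add_zero]
  have h3 : (List.drop i arr)[j - i]'h2 = arr[j] := by
    rw [List.getElem_drop]
    congr 1
    omega
  rw [h3]

lemma pvSlice_eq (arr : List Int) (i j : Nat) :
    PySem.List.slice arr (some (i : Int)) (some (j : Int)) = (arr.drop i).take (j - i) :=
  PySem.List.slice_natCast arr i j

lemma pvSlice_length (arr : List Int) (i j : Nat) (hij : i ≤ j) (hj : j ≤ arr.length) :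
    ((PySem.List.slice arr (some (i : Int)) (some (j : Int))).length : Int)
      = (j : Int) - (i : Int) := by
  rw [pvSlice_eq]
  have h : ((arr.drop i).take (j - i)).length = j - i := by
    simp only [List.length_take, List.length_drop]; omega
  rw [h]
  omega

-- shrink on a real window (k ≥ 0): stops at some i' ≤ j holding the value pvS arr i' j ≤ k
lemma pvShrinkA_spec (arr : List Int) (k : Int) (hk : 0 ≤ k) (j : Nat) (hj : j ≤ arr.length) :
    ∀ d i, j - i ≤ d → i ≤ j →
      ∃ i', i ≤ i' ∧ i' ≤ j ∧ pvS arr i' j ≤ k ∧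
        pvShrinkA arr k (pvS arr i j) i = (pvS arr i' j, i') := by
  intro d
  induction d with
  | zero =>
      intro i hd hij
      have hij' : i = j := by omega
      have h0 : pvS arr i j = 0 := by rw [hij']; exact pvS_empty arr j j (le_refl j)
      refine ⟨i, le_refl i, hij, by omega, ?_⟩
      exact pvShrinkA_done arr k _ i (by omega)
  | succ d ih =>
      intro i hd hij
      by_cases hgt : pvS arr i j > k
      · have hilt : i < j := by
          rcases Nat.lt_or_ge i j with h | h
          · exact h
          · exfalso
            rw [pvS_empty arr i j h] at hgt
            omega
        have hi : i < arr.length := by omega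
        have hget : PySem.List.pyGet? arr (i : Int) = some arr[i] := by
          simp [List.getElem?_eq_getElem hi]
        have hstep : pvS arr i j - arr[i] = pvS arr (i + 1) j := by
          rw [pvS_cons_left arr i j hilt hi]; ring
        obtain ⟨i', h1, h2, h3, h4⟩ := ih (i + 1) (by omega) (by omega)
        refine ⟨i', by omega, h2, h3, ?_⟩
        rw [pvShrinkA_step_some arr k _ i _ hgt hget, hstep]
        exact h4
      · exact ⟨i, le_refl i, hij, by omega, pvShrinkA_done arr k _ i hgt⟩

-- main loop equivalence for k ≥ 0: invariant s = pvS arr i j with i ≤ j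
lemma pvLoop_eq_pos (arr : List Int) (k : Int) (hk : 0 ≤ k) :
    ∀ rest j i mx, rest = arr.drop j → i ≤ j →
      pvLoopA arr k i j mx = pvLoopB arr k rest j i (pvS arr i j) mx := by
  intro rest
  induction rest with
  | nil =>
      intro j i mx hrest hij
      have hlen : arr.length ≤ j := by
        have h := congrArg List.length hrest
        simp only [List.length_nil, List.length_drop] at h
        omega
      rw [pvLoopA, pvLoopB]
      simp [Nat.not_lt.mpr hlen]
  | cons x rest' ih =>
      intro j i mx hrest hij
      have hjlt : j < arr.length := by
        by_contra h
        rw [List.drop_eq_nil_of_le (by omega)] at hrest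
        exact List.cons_ne_nil x rest' hrest
      rw [List.drop_eq_getElem_cons hjlt] at hrest
      have hx : arr[j] = x := by injection hrest.symm
      have hrest' : rest' = arr.drop (j + 1) := by
        have h2 : arr.drop (j + 1) = rest' := by injection hrest.symm
        exact h2.symm
      have hsum : (PySem.List.slice arr (some (i : Int)) (some (j : Int))).sum = pvS arr i j := by
        rw [pvSlice_eq]; rfl
      rw [pvLoopA]
      simp only [hjlt, dif_pos, hsum, pvLoopB]
      by_cases h1 : pvS arr i j = k
      · rw [if_pos h1, if_pos h1]
        rw [pvSlice_length arr i j hij (le_of_lt hjlt)]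
        rw [ih (j + 1) i _ hrest' (by omega)]
        rw [pvS_succ_right arr i j hij hjlt, hx]
      · rw [if_neg h1, if_neg h1]
        by_cases h2 : pvS arr i j > k
        · rw [if_pos h2, if_pos h2]
          obtain ⟨i', hi1, hi2, hi3, hi4⟩ :=
            pvShrinkA_spec arr k hk j (le_of_lt hjlt) (j - i) i (le_refl _) hij
          rw [← pvShrink_eq, hi4]
          rw [ih (j + 1) i' _ hrest' (by omega)]
          rw [pvS_succ_right arr i' j hi2 hjlt, hx]
        · rw [if_neg h2, if_neg h2]
          rw [ih (j + 1) i _ hrest' (by omega)]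
          rw [pvS_succ_right arr i j hij hjlt, hx]

-- main loop equivalence for k < 0 on Pre_: the window stays empty (i = j, s = 0)
lemma pvLoop_eq_neg (arr : List Int) (k : Int) (hk : k < 0) (hpre : ∀ x ∈ arr, -k ≤ x) :
    ∀ rest j mx, rest = arr.drop j →
      pvLoopA arr k j j mx = pvLoopB arr k rest j j 0 mx := by
  intro rest
  induction rest with
  | nil =>
      intro j mx hrest
      have hlen : arr.length ≤ j := by
        have h := congrArg List.length hrest
        simp only [List.length_nil, List.length_drop] at h
        omega
      rw [pvLoopA, pvLoopB]
      simp [Nat.not_lt.mpr hlen]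
  | cons x rest' ih =>
      intro j mx hrest
      have hjlt : j < arr.length := by
        by_contra h
        rw [List.drop_eq_nil_of_le (by omega)] at hrest
        exact List.cons_ne_nil x rest' hrest
      rw [List.drop_eq_getElem_cons hjlt] at hrest
      have hx : arr[j] = x := by injection hrest.symm
      have hrest' : rest' = arr.drop (j + 1) := by
        have h2 : arr.drop (j + 1) = rest' := by injection hrest.symm
        exact h2.symm
      have hsum : (PySem.List.slice arr (some (j : Int)) (some (j : Int))).sum = 0 := by
        rw [pvSlice_eq]
        simp
      have hget : PySem.List.pyGet? arr (j : Int) = some arr[j] := by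
        simp [List.getElem?_eq_getElem hjlt]
      have hxk : -k ≤ arr[j] := hpre arr[j] (List.getElem_mem hjlt)
      have hshrink : pvShrinkA arr k 0 j = (-arr[j], j + 1) := by
        rw [pvShrinkA_step_some arr k 0 j arr[j] hk hget]
        rw [pvShrinkA_done arr k _ (j + 1) (by omega)]
        norm_num
      rw [pvLoopA]
      simp only [hjlt, dif_pos, hsum, pvLoopB]
      have hne : ¬ ((0 : Int) = k) := by omega
      rw [if_neg hne, if_neg hne, if_pos (show (0 : Int) > k from hk),
        if_pos (show (0 : Int) > k from hk)]
      rw [← pvShrink_eq, hshrink]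
      have hs0 : -arr[j] + x = 0 := by rw [← hx]; ring
      rw [hs0]
      exact ih (j + 1) mx hrest'

-- ===== VERDICT (by name: the statement is the Claim_ definition above) =====
theorem maxSizesum_spec : Claim_equal_maxSizesum := by
  intro arr k _hdom hpre
  show maxSizesum arr k = maxSizesum_alt arr k
  unfold maxSizesum maxSizesum_alt
  by_cases hk : 0 ≤ k
  · have h := pvLoop_eq_pos arr k hk arr 0 0 0 (by simp) (le_refl 0)
    rw [pvS_empty arr 0 0 (le_refl 0)] at h
    exact h
  · have hpre' : ∀ x ∈ arr, -k ≤ x := hpre.resolve_left hk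
    exact pvLoop_eq_neg arr k (by omega) hpre' arr 0 0 (by simp)
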